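-- pv_equiv track=rewrite | github.com/Khev/abel-rl-v2 | scripts/make_structural_generalization_data.py | unique_expansions
-- ===== SOURCE A (Python) =====
-- def find_placeholders(eqn_str):
--     """Finds the unique variable placeholders in an equation."""
--     return sorted(set(ch for ch in "abcde" if ch in eqn_str))
--
-- def unique_expansions(eqn_str, letter_list, n_eqns=1):
--     """
--     Generates `n_eqns` versions of `eqn_str`, ensuring each variable placeholder
--     is mapped to a unique letter from `letter_list` in each equation.
--     """
--     placeholders = find_placeholders(eqn_str)
--     if len(placeholders) > len(letter_list):
--         raise ValueError("Not enough letters to replace all placeholders uniquely.")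
--
--     expansions = []
--     for i in range(n_eqns):
--         shuffled_letters = letter_list[i % len(letter_list):] + letter_list[:i % len(letter_list)]
--         replacement_map = {ph: rep for ph, rep in zip(placeholders, shuffled_letters)}
--
--         eqn_modified = "".join(replacement_map.get(ch, ch) for ch in eqn_str)
--         expansions.append(eqn_modified)
--
--     return expansions
-- ===== SOURCE B (Python) =====
-- def unique_expansions(eqn_str, letter_list, n_eqns=1):
--     """The output is periodic with period len(letter_list): build each distinct
--     rotation's expansion once (only the rotations actually used), then emit the
--     n_eqns results by indexing into that cache."""
--     placeholders = sorted({ch for ch in eqn_str if ch in "abcde"})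
--     if len(placeholders) > len(letter_list):
--         raise ValueError("Not enough letters to replace all placeholders uniquely.")
--     L = len(letter_list)
--     base = []
--     for r in range(min(n_eqns, L)):
--         table = {ord(ph): letter_list[(r + k) % L] for k, ph in enumerate(placeholders)}
--         base.append(eqn_str.translate(table))
--     return [base[i % L] for i in range(n_eqns)]
-- ===== Notes on version B (the rewrite author's own statement) =====
-- stated objective: alternative
-- what changed: B exploits that the output is periodic with period len(letter_list): it builds a cache with one expansion per rotation actually used (at most min(n_eqns, L) translate passes over the string) and then produces the n_eqns results by indexing the cache with i % L, instead of re-substituting the whole string for every i.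
import Mathlib
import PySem

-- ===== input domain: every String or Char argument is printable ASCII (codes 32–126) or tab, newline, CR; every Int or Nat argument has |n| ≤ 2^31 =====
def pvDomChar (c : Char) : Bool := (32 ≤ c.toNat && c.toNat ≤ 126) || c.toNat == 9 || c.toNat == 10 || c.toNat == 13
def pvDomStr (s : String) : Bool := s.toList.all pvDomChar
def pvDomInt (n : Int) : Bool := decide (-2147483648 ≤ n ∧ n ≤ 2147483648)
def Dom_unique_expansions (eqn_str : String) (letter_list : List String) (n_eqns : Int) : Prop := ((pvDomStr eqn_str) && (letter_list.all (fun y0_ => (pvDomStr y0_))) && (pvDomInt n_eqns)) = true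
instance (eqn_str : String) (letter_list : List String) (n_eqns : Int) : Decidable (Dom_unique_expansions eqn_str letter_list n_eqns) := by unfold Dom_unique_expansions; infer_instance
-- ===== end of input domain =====

-- B exploits the period-len(letter_list) structure of the output: it caches one expansion per
-- rotation actually used and emits the n results by indexing the cache (objective: alternative).

-- ===== PORT A =====
-- find_placeholders: sorted(set(ch for ch in "abcde" if ch in eqn_str))
def find_placeholders (eqn_str : String) : List Char :=
  PySem.List.sorted
    (PySem.Set.ofList (("abcde".toList).filter (fun ch => PySem.Str.isIn (String.ofList [ch]) eqn_str)))
    (fun x => x) false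

def unique_expansions (eqn_str : String) (letter_list : List String) (n_eqns : Int) : List String :=
  let placeholders := find_placeholders eqn_str
  if placeholders.length > letter_list.length then
    []  -- 'raise ValueError(...)': these inputs are excluded by Pre_
  else
    (PySem.List.pyRange 0 n_eqns 1).foldl (fun expansions i =>
      let m := PySem.Int.mod i (letter_list.length : Int)   -- i % len(letter_list); ZeroDivisionError excluded by Pre_
      let shuffled_letters :=
        PySem.List.slice letter_list (some m) none ++ PySem.List.slice letter_list none (some m)
      let replacement_map : PySem.Dict Char String :=
        PySem.Dict.ofList (placeholders.zip shuffled_letters)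
      let eqn_modified :=
        PySem.Str.join "" (eqn_str.toList.map (fun ch => replacement_map.getD ch (String.ofList [ch])))
      expansions ++ [eqn_modified]) []

-- ===== PORT B =====
def unique_expansions_alt (eqn_str : String) (letter_list : List String) (n_eqns : Int) : List String :=
  let placeholders :=
    PySem.List.sorted
      (PySem.Set.ofList (eqn_str.toList.filter (fun ch => PySem.Str.isIn (String.ofList [ch]) "abcde")))
      (fun x => x) false
  if placeholders.length > letter_list.length then
    []  -- 'raise ValueError(...)': these inputs are excluded by Pre_
  else
    let L : Int := (letter_list.length : Int)
    let base :=
      (PySem.List.pyRange 0 (min n_eqns L) 1).foldl (fun base r =>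
        -- {ord(ph): letter_list[(r + k) % L] for k, ph in enumerate(placeholders)}
        let table : PySem.Dict Char String :=
          PySem.Dict.ofList ((PySem.List.enumerate placeholders 0).map
            (fun p => (p.2, PySem.List.pyGetD letter_list (PySem.Int.mod (r + p.1) L) "")))
        -- eqn_str.translate(table): ported by hand as the per-character table lookup (exact:
        -- the table's keys are exactly the placeholder code points, values the letters)
        base ++ [PySem.Str.join "" (eqn_str.toList.map (fun c => table.getD c (String.ofList [c])))]) []
    (PySem.List.pyRange 0 n_eqns 1).map
      (fun i => PySem.List.pyGetD base (PySem.Int.mod i L) "")  -- base[i % L]; in range under Pre_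

-- ===== PRECONDITION & SPEC =====
-- Pre_ excludes exactly the inputs where A raises: ValueError when the string holds more distinct
-- placeholders (a..e) than letter_list has letters, and ZeroDivisionError from 'i % len(letter_list)'
-- when letter_list is empty and at least one equation is requested.
def Pre_unique_expansions (eqn_str : String) (letter_list : List String) (n_eqns : Int) : Prop :=
  (("abcde".toList).filter (fun ch => eqn_str.toList.contains ch)).length ≤ letter_list.length ∧
  (letter_list ≠ [] ∨ n_eqns ≤ 0)
instance (eqn_str : String) (letter_list : List String) (n_eqns : Int) : Decidable (Pre_unique_expansions eqn_str letter_list n_eqns) := by unfold Pre_unique_expansions; infer_instance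

def pvWitness_unique_expansions : String × List String × Int := ("a+b=c", ["x", "y", "z"], 3)

def Spec_unique_expansions (eqn_str : String) (letter_list : List String) (n_eqns : Int) (out : List String) : Prop := out = unique_expansions_alt eqn_str letter_list n_eqns
instance (eqn_str : String) (letter_list : List String) (n_eqns : Int) (out : List String) : Decidable (Spec_unique_expansions eqn_str letter_list n_eqns out) := by unfold Spec_unique_expansions; infer_instance

-- ===== CLAIM (what is proved, stated in full; the proofs are below) =====
def Claim_equal_unique_expansions : Prop := ∀ (eqn_str : String) (letter_list : List String) (n_eqns : Int), Dom_unique_expansions eqn_str letter_list n_eqns → Pre_unique_expansions eqn_str letter_list n_eqns → Spec_unique_expansions eqn_str letter_list n_eqns (unique_expansions eqn_str letter_list n_eqns)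

-- ===== LEMMAS AND PROOFS =====

-- 'ch in s' for a single character is list membership
theorem ue_isIn_singleton (c : Char) (s : String) :
    PySem.Str.isIn (String.ofList [c]) s = true ↔ c ∈ s.toList := by
  rw [PySem.Str.isIn_iff_infix, String.toList_ofList]
  exact List.singleton_infix_iff c s.toList

-- both programs compute the same sorted placeholder list
theorem ue_ph_eq (e : String) :
    PySem.List.sorted
      (PySem.Set.ofList (e.toList.filter (fun ch => PySem.Str.isIn (String.ofList [ch]) "abcde")))
      (fun x => x) false = find_placeholders e := by
  apply PySem.List.sorted_eq_sorted_of_perm _ _ _ (fun a b h => h)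
  rw [List.perm_ext_iff_of_nodup (PySem.Set.nodup_ofList _) (PySem.Set.nodup_ofList _)]
  intro c
  simp only [PySem.Set.mem_ofList, List.mem_filter, ue_isIn_singleton]
  tauto

-- the rotated letter list, indexed: shuffled[k] = letter_list[(r + k) % L]
theorem ue_shuffled_get (ls : List String) (r k : Nat) (hr : r < ls.length)
    (hk : k < ls.length) :
    (ls.drop r ++ ls.take r)[k]'(by simp; omega)
      = PySem.List.pyGetD ls (PySem.Int.mod ((r : Int) + (k : Int)) (ls.length : Int)) "" := by
  have hcast : (r : Int) + (k : Int) = ((r + k : Nat) : Int) := by push_cast; ring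
  rw [hcast, PySem.Int.mod_natCast, PySem.List.pyGetD_natCast]
  have hmlt : (r + k) % ls.length < ls.length := Nat.mod_lt _ (by omega)
  rw [List.getD_eq_getElem?_getD, List.getElem?_eq_getElem hmlt]
  by_cases hlt : k < ls.length - r
  · rw [List.getElem_append_left (by simp; omega)]
    rw [List.getElem_drop]
    have : (r + k) % ls.length = r + k := Nat.mod_eq_of_lt (by omega)
    simp [this]
  · rw [List.getElem_append_right (by simp; omega)]
    have h1 : (r + k) % ls.length = r + k - ls.length := by
      have h2 : (r + k) % ls.length = (r + k - ls.length) % ls.length := by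
        rw [Nat.mod_eq_sub_mod (by omega)]
      rw [h2, Nat.mod_eq_of_lt (by omega)]
    rw [List.getElem_take]
    simp only [List.length_drop]
    congr 1
    omega

-- A's zipped pairs and B's enumerate-built pairs are the SAME association list
theorem ue_pairs_eq (ps : List Char) (ls : List String) (r : Int)
    (hr0 : 0 ≤ r) (hrL : r < (ls.length : Int)) (hg : ps.length ≤ ls.length) :
    ps.zip (PySem.List.slice ls (some r) none ++ PySem.List.slice ls none (some r))
      = (PySem.List.enumerate ps 0).map
          (fun p => (p.2, PySem.List.pyGetD ls (PySem.Int.mod (r + p.1) (ls.length : Int)) "")) := by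
  set R := r.toNat with hR
  have hrc : r = (R : Int) := by omega
  have hRlt : R < ls.length := by omega
  rw [hrc, PySem.List.slice_from ls (by omega), PySem.List.slice_to ls (by omega)]
  simp only [Int.toNat_natCast]
  apply List.ext_getElem
  · simp [PySem.List.length_enumerate]
    omega
  · intro k hk1 hk2
    have hkp : k < ps.length := by
      simpa [PySem.List.length_enumerate] using hk2
    rw [List.getElem_zip, List.getElem_map, PySem.List.getElem_enumerate]
    simp only [Int.zero_add]
    have := ue_shuffled_get ls R k hRlt (by omega)
    rw [this]

-- per-i equality of the produced strings: A's body at i equals B's cached string at i % L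
theorem ue_body_eq (e : String) (ps : List Char) (ls : List String) (i : Int)
    (hL : 0 < ls.length) (hg : ps.length ≤ ls.length) :
    PySem.Str.join "" (e.toList.map (fun ch =>
      (PySem.Dict.ofList (ps.zip
        (PySem.List.slice ls (some (PySem.Int.mod i (ls.length : Int))) none
          ++ PySem.List.slice ls none (some (PySem.Int.mod i (ls.length : Int)))))).getD ch
        (String.ofList [ch])))
    = PySem.Str.join "" (e.toList.map (fun c =>
      (PySem.Dict.ofList ((PySem.List.enumerate ps 0).map
        (fun p => (p.2, PySem.List.pyGetD ls
          (PySem.Int.mod (PySem.Int.mod i (ls.length : Int) + p.1) (ls.length : Int)) "")))).getD c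
        (String.ofList [c]))) := by
  have hLpos : (0:Int) < (ls.length : Int) := by exact_mod_cast hL
  rw [ue_pairs_eq ps ls (PySem.Int.mod i (ls.length : Int))
        (PySem.Int.mod_nonneg i hLpos) (PySem.Int.mod_lt i hLpos) hg]

-- ===== VERDICT (by name: the statement is the Claim_ definition above) =====
theorem unique_expansions_spec : Claim_equal_unique_expansions := by
  intro e ls n _dom hpre
  unfold Spec_unique_expansions
  unfold unique_expansions unique_expansions_alt
  rw [ue_ph_eq]
  by_cases hgt : (find_placeholders e).length > ls.length
  · simp [hgt]
  · simp only [hgt, if_false]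
    by_cases hn : n ≤ 0
    · rw [PySem.List.pyRange_one_eq_nil hn]
      simp
    · have hls : ls ≠ [] := by
        rcases hpre.2 with h | h
        · exact h
        · omega
      have hL : 0 < ls.length := List.length_pos_iff.mpr hls
      have hLpos : (0:Int) < (ls.length : Int) := by exact_mod_cast hL
      have hg : (find_placeholders e).length ≤ ls.length := by omega
      rw [PySem.List.foldl_append_singleton_eq_map, PySem.List.foldl_append_singleton_eq_map]
      simp only [List.nil_append]
      apply List.map_congr_left
      intro i hi
      rw [PySem.List.mem_pyRange_one] at hi
      obtain ⟨hi0, hin⟩ := hi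
      have hi' : i = ((i.toNat : Nat) : Int) := by omega
      have hb : 0 ≤ PySem.Int.mod i (ls.length : Int) ∧
          PySem.Int.mod i (ls.length : Int) < min n (ls.length : Int) := by
        rw [hi', PySem.Int.mod_natCast, lt_min_iff]
        have h4 := Nat.mod_le i.toNat ls.length
        have h5 := Nat.mod_lt i.toNat hL
        refine ⟨Int.natCast_nonneg _, ?_, ?_⟩
        · have h6 : ((i.toNat % ls.length : Nat) : Int) ≤ ((i.toNat : Nat) : Int) := by
            exact_mod_cast h4
          omega
        · exact_mod_cast h5
      rw [PySem.List.pyGetD_map_pyRange_of_nonneg _ _ _ _ hb.1 hb.2]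
      exact ue_body_eq e (find_placeholders e) ls i hL hg
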